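-- pv_equiv track=rewrite | github.com/Grki27/kod_za_rad | final_navigation.py | get_opposite_action
-- ===== SOURCE A (Python) =====
-- def get_opposite_action(action):
--     opposites = {
--         "go left": "go right",
--         "go right": "go left",
--         "go up": "go down",
--         "go down": "go up"
--     }
--     for key in opposites:
--         if action.startswith(key):
--             return opposites[key] + action[len(key):]
--     return None
-- ===== SOURCE B (Python) =====
-- # B: no loop over prefixes -- split off "go ", dispatch on the direction's first
-- # character via a small table, verify the direction word, rebuild the string.
-- _DIRS = {'l': ('left', 'right'), 'r': ('right', 'left'),
--          'u': ('up', 'down'), 'd': ('down', 'up')}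
--
-- def get_opposite_action(action):
--     if action.startswith('go '):
--         rest = action[3:]
--         entry = _DIRS.get(rest[0:1])
--         if entry is not None:
--             d, opp = entry
--             if rest.startswith(d):
--                 return 'go ' + opp + rest[len(d):]
--     return None
-- ===== Notes on version B (the rewrite author's own statement) =====
-- stated objective: alternative
-- what changed: Replaced the loop testing four full movement prefixes with a loop-free decomposition: strip the shared two-word prefix once, dispatch on the direction's first character via a small table, verify the direction word and rebuild the string.
import Mathlib
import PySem

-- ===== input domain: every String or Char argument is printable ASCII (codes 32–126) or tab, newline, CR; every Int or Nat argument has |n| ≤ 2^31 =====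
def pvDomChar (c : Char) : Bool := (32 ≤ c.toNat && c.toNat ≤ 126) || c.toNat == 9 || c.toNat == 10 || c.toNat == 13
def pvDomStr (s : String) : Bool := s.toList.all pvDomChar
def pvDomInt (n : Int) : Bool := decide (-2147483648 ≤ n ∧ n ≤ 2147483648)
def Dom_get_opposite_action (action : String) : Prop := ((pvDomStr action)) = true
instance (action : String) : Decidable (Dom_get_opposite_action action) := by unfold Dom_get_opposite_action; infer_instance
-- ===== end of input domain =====

-- B strips the shared two-word prefix once and dispatches on the direction's first character through a
-- table instead of testing four full prefixes in a loop; return values only.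

-- ===== PORT A =====
-- the dict literal of A, as an insertion-ordered association list on code points
def pvOppA : List (List Char × List Char) :=
  [("go left".toList, "go right".toList), ("go right".toList, "go left".toList),
   ("go up".toList, "go down".toList), ("go down".toList, "go up".toList)]

-- A's for-loop over the dict keys, with its early return
def pvLoopA (ac : List Char) : List (List Char × List Char) → Option (List Char)
  | [] => none
  | (k, v) :: rest =>
      if PySem.Chars.startswith ac k then
        some (v ++ PySem.Chars.slice ac (some (k.length : Int)) none)
      else pvLoopA ac rest

def get_opposite_action (action : String) : Option String :=
  (pvLoopA action.toList pvOppA).map String.ofList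

-- ===== PORT B =====
-- B's _DIRS table: first character of the direction ↦ (direction, opposite)
def pvDirsB : PySem.Dict (List Char) (List Char × List Char) :=
  PySem.Dict.mk [(['l'], ("left".toList, "right".toList)), (['r'], ("right".toList, "left".toList)),
   (['u'], ("up".toList, "down".toList)), (['d'], ("down".toList, "up".toList))]

def get_opposite_action_alt (action : String) : Option String :=
  let ac := action.toList
  if PySem.Chars.startswith ac "go ".toList then
    let rest := PySem.Chars.slice ac (some 3) none
    match PySem.Dict.get? pvDirsB (PySem.Chars.slice rest (some 0) (some 1)) with
    | some (d, opp) =>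
        if PySem.Chars.startswith rest d then
          some (String.ofList ("go ".toList ++ opp ++ PySem.Chars.slice rest (some (d.length : Int)) none))
        else none
    | none => none
  else none

-- ===== PRECONDITION & SPEC =====
def Spec_get_opposite_action (action : String) (out : Option String) : Prop := out = get_opposite_action_alt action
instance (action : String) (out : Option String) : Decidable (Spec_get_opposite_action action out) := by unfold Spec_get_opposite_action; infer_instance

-- ===== CLAIM (what is proved, stated in full; the proofs are below) =====
def Claim_equal_get_opposite_action : Prop := ∀ (action : String), Dom_get_opposite_action action → Spec_get_opposite_action action (get_opposite_action action)

-- ===== LEMMAS AND PROOFS =====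
theorem pv_core (l : List Char) :
    pvLoopA l pvOppA =
      (if PySem.Chars.startswith l "go ".toList then
        let rest := PySem.Chars.slice l (some 3) none
        match PySem.Dict.get? pvDirsB (PySem.Chars.slice rest (some 0) (some 1)) with
        | some (d, opp) =>
            if PySem.Chars.startswith rest d then
              some ("go ".toList ++ opp ++ PySem.Chars.slice rest (some (d.length : Int)) none)
            else none
        | none => none
      else none) := by
  rcases l with _ | ⟨c0, _ | ⟨c1, _ | ⟨c2, _ | ⟨c3, t⟩⟩⟩⟩
  · decide
  · simp [pvLoopA, pvOppA, PySem.Chars.startswith_iff, List.cons_prefix_cons]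
  · simp [pvLoopA, pvOppA, PySem.Chars.startswith_iff, List.cons_prefix_cons]
  · simp [pvLoopA, pvOppA, pvDirsB, PySem.Chars.startswith_iff, List.cons_prefix_cons,
          PySem.List.slice_from, PySem.List.slice_to, PySem.Dict.get?]
  · by_cases h0 : 'g' = c0
    case neg => simp [pvLoopA, pvOppA, PySem.Chars.startswith_iff, List.cons_prefix_cons, h0]
    by_cases h1 : 'o' = c1
    case neg => simp [pvLoopA, pvOppA, PySem.Chars.startswith_iff, List.cons_prefix_cons, h1]
    by_cases h2 : ' ' = c2
    case neg => simp [pvLoopA, pvOppA, PySem.Chars.startswith_iff, List.cons_prefix_cons, h2]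
    subst h0; subst h1; subst h2
    by_cases hl : 'l' = c3
    · subst hl
      simp [pvLoopA, pvOppA, pvDirsB, PySem.Chars.startswith_iff, List.cons_prefix_cons,
            PySem.List.slice_from, PySem.List.slice_to, PySem.Dict.get?]
    by_cases hr : 'r' = c3
    · subst hr
      simp [pvLoopA, pvOppA, pvDirsB, PySem.Chars.startswith_iff, List.cons_prefix_cons,
            PySem.List.slice_from, PySem.List.slice_to, PySem.Dict.get?]
    by_cases hu : 'u' = c3
    · subst hu
      simp [pvLoopA, pvOppA, pvDirsB, PySem.Chars.startswith_iff, List.cons_prefix_cons,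
            PySem.List.slice_from, PySem.List.slice_to, PySem.Dict.get?]
    by_cases hd : 'd' = c3
    · subst hd
      simp [pvLoopA, pvOppA, pvDirsB, PySem.Chars.startswith_iff, List.cons_prefix_cons,
            PySem.List.slice_from, PySem.List.slice_to, PySem.Dict.get?]
    · simp [pvLoopA, pvOppA, pvDirsB, PySem.Chars.startswith_iff, List.cons_prefix_cons,
            PySem.List.slice_from, PySem.List.slice_to, PySem.Dict.get?,
            hl, hr, hu, hd]

-- ===== VERDICT (by name: the statement is the Claim_ definition above) =====
theorem get_opposite_action_spec : Claim_equal_get_opposite_action := by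
  intro action _
  unfold Spec_get_opposite_action get_opposite_action get_opposite_action_alt
  rw [pv_core action.toList]
  simp only [PySem.Chars.slice_eq_listSlice, PySem.List.slice_zero_start]
  split_ifs with h
  · cases pvDirsB.get? (PySem.List.slice (PySem.List.slice action.toList (some 3) none) none (some 1)) with
    | none => simp
    | some dv =>
        obtain ⟨d, opp⟩ := dv
        dsimp only
        split_ifs <;> simp
  · simp
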